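-- pv_equiv track=rewrite | github.com/mstendorf/adventofcode | day13/main.py | find_vertical_reflection
-- ===== SOURCE A (Python) =====
-- def find_vertical_reflection(pattern):
--     for i in range(len(pattern[0]) - 1):
--         if pattern[0][i] == pattern[0][i + 1]:
--             valid = True
--             for j in range(len(pattern)):
--                 if pattern[j][i] != pattern[j][i + 1]:
--                     valid = False
--
--             if valid:
--                 return i + 1
--     return 0
-- ===== SOURCE B (Python) =====
-- def find_vertical_reflection(pattern):
--     cols = list(zip(*pattern))
--     for i in range(len(pattern[0]) - 1):
--         if cols[i] == cols[i + 1]: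
--             return i + 1
--     return 0
-- ===== Notes on version B (the rewrite author's own statement) =====
-- stated objective: simpler
-- what changed: Transpose the grid once with zip(*pattern) and compare whole adjacent columns by tuple equality, replacing the nested per-row flag-loop scan.
-- outside the precondition, e.g. on find_vertical_reflection(['ab', 'a']): A returns 0, B raises IndexError
import Mathlib
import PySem

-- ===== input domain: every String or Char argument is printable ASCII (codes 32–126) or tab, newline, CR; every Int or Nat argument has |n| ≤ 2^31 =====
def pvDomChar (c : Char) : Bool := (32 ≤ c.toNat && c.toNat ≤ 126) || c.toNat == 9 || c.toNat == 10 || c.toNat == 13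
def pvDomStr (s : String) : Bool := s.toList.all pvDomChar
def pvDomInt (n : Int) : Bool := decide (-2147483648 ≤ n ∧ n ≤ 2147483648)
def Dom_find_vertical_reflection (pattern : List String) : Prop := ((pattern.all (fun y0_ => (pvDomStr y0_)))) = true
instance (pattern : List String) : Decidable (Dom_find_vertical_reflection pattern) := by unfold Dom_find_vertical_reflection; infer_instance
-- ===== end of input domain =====

-- ===== PORT A =====
-- B replaces A's nested per-row flag scan by one zip-transpose and whole-column equality (simpler; same cost).
-- Python inner loop: for j in range(len(pattern)): if pattern[j][i] != pattern[j][i+1]: valid = False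
def fvrCheckCol (pattern : List String) (i : Nat) : Bool :=
  pattern.foldl (fun valid row =>
    if row.toList.getD i ' ' ≠ row.toList.getD (i + 1) ' ' then false else valid) true

-- Python outer loop over range(len(pattern[0]) - 1); first hit returns i + 1, else 0
def fvrLoop (pattern : List String) (r0 : List Char) : List Nat → Int
  | [] => 0
  | i :: rest =>
    if r0.getD i ' ' = r0.getD (i + 1) ' ' then
      if fvrCheckCol pattern i then (i : Int) + 1 else fvrLoop pattern r0 rest
    else fvrLoop pattern r0 rest

def find_vertical_reflection (pattern : List String) : Int :=
  let r0 := (pattern.headD "").toList    -- pattern[0]; in range by Pre_ (pattern nonempty)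
  fvrLoop pattern r0 (List.range (r0.length - 1))

-- ===== PORT B =====
-- cols = list(zip(*pattern)): one char per row, truncated to the shortest row
def fvrAltCols (rows : List (List Char)) : List (List Char) :=
  let m := (rows.map List.length).min?.getD 0
  (List.range m).map (fun i => rows.map (fun row => row.getD i ' '))

def fvrAltLoop (cols : List (List Char)) : List Nat → Int
  | [] => 0
  | i :: rest =>
    if cols.getD i [] = cols.getD (i + 1) [] then (i : Int) + 1 else fvrAltLoop cols rest

def find_vertical_reflection_alt (pattern : List String) : Int :=
  let cols := fvrAltCols (pattern.map String.toList)
  fvrAltLoop cols (List.range (((pattern.headD "").toList).length - 1))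

-- ===== PRECONDITION & SPEC =====
-- Pre_ excludes the empty pattern (pattern[0] raises IndexError in both programs) and ragged grids
-- whose first row has ≥ 2 characters and is longer than some later row: there A raises IndexError
-- whenever the scan reaches a column missing from a short row, and B's zip truncation makes B raise
-- instead; A does still return on some such ragged grids when a reflection is found before any short
-- row is reached (see the cites), but ragged input is outside the grid's purpose.
def Pre_find_vertical_reflection (pattern : List String) : Prop :=
  pattern ≠ [] ∧
    ((pattern.headD "").length ≤ 1 ∨ ∀ r ∈ pattern, (pattern.headD "").length ≤ r.length)
instance (pattern : List String) : Decidable (Pre_find_vertical_reflection pattern) := by unfold Pre_find_vertical_reflection; infer_instance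

def pvWitness_find_vertical_reflection : List String := ["abba", "cddc"]

def Spec_find_vertical_reflection (pattern : List String) (out : Int) : Prop := out = find_vertical_reflection_alt pattern
instance (pattern : List String) (out : Int) : Decidable (Spec_find_vertical_reflection pattern out) := by unfold Spec_find_vertical_reflection; infer_instance

-- ===== CLAIM (what is proved, stated in full; the proofs are below) =====
def Claim_equal_find_vertical_reflection : Prop := ∀ (pattern : List String), Dom_find_vertical_reflection pattern → Pre_find_vertical_reflection pattern → Spec_find_vertical_reflection pattern (find_vertical_reflection pattern)

-- ===== LEMMAS AND PROOFS =====

theorem fvrCheckCol_eq_all (pattern : List String) (i : Nat) :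
    fvrCheckCol pattern i =
      pattern.all (fun row => row.toList.getD i ' ' == row.toList.getD (i + 1) ' ') := by
  unfold fvrCheckCol
  suffices h : ∀ (l : List String) (b : Bool),
      l.foldl (fun valid row =>
        if row.toList.getD i ' ' ≠ row.toList.getD (i + 1) ' ' then false else valid) b
        = (b && l.all (fun row => row.toList.getD i ' ' == row.toList.getD (i + 1) ' ')) by
    simpa using h pattern true
  intro l
  induction l with
  | nil => simp
  | cons r t ih =>
    intro b
    simp only [List.foldl_cons, List.all_cons, ih]
    by_cases h : r.toList.getD i ' ' = r.toList.getD (i + 1) ' '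
    · rw [if_neg (not_not_intro h),
        show (r.toList.getD i ' ' == r.toList.getD (i + 1) ' ') = true from beq_iff_eq.mpr h]
      simp
    · rw [if_pos h,
        show (r.toList.getD i ' ' == r.toList.getD (i + 1) ' ') = false from
          beq_eq_false_iff_ne.mpr h]
      simp

theorem fvrAltCols_getD (rows : List (List Char)) (i : Nat)
    (hi : i < (rows.map List.length).min?.getD 0) :
    (fvrAltCols rows).getD i [] = rows.map (fun row => row.getD i ' ') := by
  unfold fvrAltCols
  simp only
  rw [List.getD, List.getElem?_map, List.getElem?_range hi]
  rfl

theorem fvrMin_eq (r0 : List Char) (rs : List (List Char))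
    (h : ∀ r ∈ r0 :: rs, r0.length ≤ r.length) :
    ((r0 :: rs).map List.length).min?.getD 0 = r0.length := by
  have hm : ((r0 :: rs).map List.length).min? = some r0.length := by
    rw [List.min?_eq_some_iff]
    constructor
    · exact List.mem_map_of_mem (by simp : r0 ∈ r0 :: rs)
    · intro b hb
      rcases List.mem_map.mp hb with ⟨r, hr, rfl⟩
      exact h r hr
  rw [hm]
  rfl

theorem fvrLoop_eq_altLoop (pattern : List String) (rows : List (List Char)) (r0 : List Char)
    (hrows : rows = pattern.map String.toList)
    (hr0 : r0 = (pattern.headD "").toList)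
    (hne : pattern ≠ [])
    (hmin : (rows.map List.length).min?.getD 0 = r0.length) :
    ∀ (L : List Nat), (∀ i ∈ L, i + 1 < r0.length) →
      fvrLoop pattern r0 L = fvrAltLoop (fvrAltCols rows) L := by
  intro L
  induction L with
  | nil => intro _; rfl
  | cons i rest ih =>
    intro hL
    have hi1 : i + 1 < r0.length := hL i (by simp)
    have hci : (fvrAltCols rows).getD i [] = rows.map (fun row => row.getD i ' ') :=
      fvrAltCols_getD rows i (by omega)
    have hci1 : (fvrAltCols rows).getD (i + 1) [] = rows.map (fun row => row.getD (i + 1) ' ') :=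
      fvrAltCols_getD rows (i + 1) (by omega)
    have hrest := ih (fun j hj => hL j (by simp [hj]))
    have hr0mem : r0 ∈ rows := by
      cases pattern with
      | nil => exact absurd rfl hne
      | cons p ps => subst hrows hr0; simp
    have hcols : ((fvrAltCols rows).getD i [] = (fvrAltCols rows).getD (i + 1) []) ↔
        (∀ row ∈ rows, row.getD i ' ' = row.getD (i + 1) ' ') := by
      rw [hci, hci1, List.map_inj_left]
    have hall : (∀ row ∈ rows, row.getD i ' ' = row.getD (i + 1) ' ') ↔
        (r0.getD i ' ' = r0.getD (i + 1) ' ' ∧ fvrCheckCol pattern i = true) := by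
      rw [fvrCheckCol_eq_all]
      constructor
      · intro hp
        refine ⟨hp r0 hr0mem, ?_⟩
        rw [List.all_eq_true]
        intro s hs
        exact beq_iff_eq.mpr (hp s.toList (by subst hrows; exact List.mem_map_of_mem hs))
      · rintro ⟨-, hall⟩ row hrow
        subst hrows
        rcases List.mem_map.mp hrow with ⟨s, hs, rfl⟩
        exact beq_iff_eq.mp (List.all_eq_true.mp hall s hs)
    show fvrLoop pattern r0 (i :: rest) = fvrAltLoop (fvrAltCols rows) (i :: rest)
    rw [fvrLoop, fvrAltLoop]
    by_cases hcond : (fvrAltCols rows).getD i [] = (fvrAltCols rows).getD (i + 1) []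
    · have := hall.mp (hcols.mp hcond)
      rw [if_pos this.1, if_pos this.2, if_pos hcond]
    · rw [if_neg hcond]
      by_cases h0 : r0.getD i ' ' = r0.getD (i + 1) ' '
      · rw [if_pos h0]
        have hck : ¬ fvrCheckCol pattern i = true := fun hc =>
          hcond (hcols.mpr (hall.mpr ⟨h0, hc⟩))
        rw [if_neg hck]
        exact hrest
      · rw [if_neg h0]
        exact hrest

-- ===== VERDICT (by name: the statement is the Claim_ definition above) =====
theorem find_vertical_reflection_spec : Claim_equal_find_vertical_reflection := by
  intro pattern _ hpre
  obtain ⟨hne, hle'⟩ := hpre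
  unfold Spec_find_vertical_reflection find_vertical_reflection find_vertical_reflection_alt
  simp only
  rcases hle' with h1 | hle
  · have hz : ((pattern.headD "").toList).length - 1 = 0 := by
      have := String.length_toList (s := pattern.headD "")
      omega
    rw [hz]
    rfl
  have hmin : ((pattern.map String.toList).map List.length).min?.getD 0
      = ((pattern.headD "").toList).length := by
    cases pattern with
    | nil => exact absurd rfl hne
    | cons p ps =>
      simp only [List.map_cons, List.headD_cons]
      have := fvrMin_eq p.toList (ps.map String.toList) ?_
      · simpa using this
      · intro r hr
        rcases List.mem_cons.mp hr with hr | hr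
        · simp [hr]
        · rcases List.mem_map.mp hr with ⟨s, hs, rfl⟩
          have := hle s (by simp [hs])
          simpa [← String.length_toList] using this
  exact fvrLoop_eq_altLoop pattern (pattern.map String.toList) ((pattern.headD "").toList)
    rfl rfl hne hmin (List.range (((pattern.headD "").toList).length - 1))
    (fun i hi => by have := List.mem_range.mp hi; omega)
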